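-- pv_equiv track=rewrite | github.com/Evan-Johnson/dataAnnotation | decoder.py | makePyramid
-- ===== SOURCE A (Python) =====
-- def makePyramid(sortedList):
--     n = 1
--     end_index = []
--     while len(end_index) == 0 or end_index[-1] < len(sortedList):
--         if len(end_index) == 0:
--             end_index.append(n)
--         else:
--             end_index.append(end_index[-1] + n)
--
--         n += 1
--
--     return end_index
-- ===== SOURCE B (Python) =====
-- def makePyramid(sortedList):
--     L = len(sortedList)
--
--     def go(k):
--         t = k * (k + 1) // 2
--         if t < L:
--             return [t] + go(k + 1)
--         return [t]
--
--     return go(1)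
-- ===== Notes on version B (the rewrite author's own statement) =====
-- stated objective: idiomatic
-- what changed: B drops A's running-sum accumulator and last-element inspection: each pyramid boundary is computed directly from its index by the closed form k*(k+1)//2, via a recursion that builds the list front-to-back instead of appending to mutable state.
import Mathlib
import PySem

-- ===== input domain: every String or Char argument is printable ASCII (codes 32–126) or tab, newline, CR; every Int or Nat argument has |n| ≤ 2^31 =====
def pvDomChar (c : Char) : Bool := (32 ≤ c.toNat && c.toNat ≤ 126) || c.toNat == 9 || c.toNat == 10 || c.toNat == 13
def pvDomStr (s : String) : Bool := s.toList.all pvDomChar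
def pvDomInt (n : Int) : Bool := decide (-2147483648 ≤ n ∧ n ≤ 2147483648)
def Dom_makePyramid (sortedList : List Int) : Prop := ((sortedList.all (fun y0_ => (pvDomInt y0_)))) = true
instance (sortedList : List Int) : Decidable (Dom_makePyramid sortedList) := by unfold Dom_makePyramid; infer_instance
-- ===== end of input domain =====

-- B drops A's running-sum accumulator: each boundary comes from the closed form k*(k+1)//2 (idiomatic; same cost).

-- used by the ports' termination proofs (cited in decreasing_by)
theorem pvTriMul (k : Nat) : k * (k + 1) / 2 * 2 = k * (k + 1) := by
  obtain ⟨c, hc⟩ := Nat.even_mul_succ_self k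
  omega

-- ===== PORT A =====
-- A's while-loop after its unconditional first iteration (which appends n = 1):
-- Python's n is represented as m + 1 (so the loop starts with m = 1, i.e. n = 2);
-- state: `last` = end_index[-1], `acc` = end_index.
def makePyramidGo (L : Int) (m : Nat) (last : Int) (acc : List Int) : List Int :=
  if last < L then
    makePyramidGo L (m + 1) (last + ((m : Int) + 1)) (acc ++ [last + ((m : Int) + 1)])
  else acc
termination_by (L - last).toNat
decreasing_by omega

def makePyramid (sortedList : List Int) : List Int :=
  makePyramidGo (sortedList.length : Int) 1 1 [1]

-- ===== PORT B =====
-- Source B's recursion: t = k*(k+1)//2 (Nat division is exact here, = Python's //).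
def makePyramidAltGo (L : Int) (k : Nat) : List Int :=
  let t : Int := ((k * (k + 1) / 2 : Nat) : Int)
  if t < L then t :: makePyramidAltGo L (k + 1) else [t]
termination_by (L - ((k * (k + 1) / 2 : Nat) : Int)).toNat
decreasing_by
  have h1 := pvTriMul k
  have h2 := pvTriMul (k + 1)
  have h3 : (k + 1) * (k + 1 + 1) = k * (k + 1) + (k + 1) + (k + 1) := by ring
  omega

def makePyramid_alt (sortedList : List Int) : List Int :=
  makePyramidAltGo (sortedList.length : Int) 1

-- ===== PRECONDITION & SPEC =====
def Spec_makePyramid (sortedList : List Int) (out : List Int) : Prop := out = makePyramid_alt sortedList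
instance (sortedList : List Int) (out : List Int) : Decidable (Spec_makePyramid sortedList out) := by unfold Spec_makePyramid; infer_instance

-- ===== CLAIM (what is proved, stated in full; the proofs are below) =====
def Claim_equal_makePyramid : Prop := ∀ (sortedList : List Int), Dom_makePyramid sortedList → Spec_makePyramid sortedList (makePyramid sortedList)

-- ===== LEMMAS AND PROOFS =====

-- the k-th triangular number, as Source B computes it
def pvT (m : Nat) : Int := ((m * (m + 1) / 2 : Nat) : Int)

theorem pvT_succ (m : Nat) : pvT (m + 1) = pvT m + ((m : Int) + 1) := by
  unfold pvT
  have h1 := pvTriMul m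
  have h2 := pvTriMul (m + 1)
  have h3 : (m + 1) * (m + 1 + 1) = m * (m + 1) + (m + 1) + (m + 1) := by ring
  omega

theorem altGo_cons (L : Int) (m : Nat) :
    makePyramidAltGo L m = pvT m :: (if pvT m < L then makePyramidAltGo L (m + 1) else []) := by
  rw [makePyramidAltGo]
  show (if pvT m < L then pvT m :: makePyramidAltGo L (m + 1) else [pvT m]) =
    pvT m :: (if pvT m < L then makePyramidAltGo L (m + 1) else [])
  split <;> rfl

theorem pvKey (L : Int) (N : Nat) : ∀ (m : Nat) (acc : List Int),
    (L - pvT m).toNat ≤ N →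
    makePyramidGo L m (pvT m) acc = acc ++ (if pvT m < L then makePyramidAltGo L (m + 1) else []) := by
  induction N with
  | zero =>
    intro m acc h
    have hn : ¬ pvT m < L := by omega
    rw [makePyramidGo]
    simp [hn]
  | succ N ih =>
    intro m acc h
    by_cases hlt : pvT m < L
    · rw [makePyramidGo]
      simp only [if_pos hlt]
      have hs : pvT m + ((m : Int) + 1) = pvT (m + 1) := (pvT_succ m).symm
      rw [hs]
      rw [ih (m + 1) (acc ++ [pvT (m + 1)]) (by have := pvT_succ m; omega)]
      rw [altGo_cons L (m + 1)]
      by_cases h2 : pvT (m + 1) < L <;> simp [h2]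
    · rw [makePyramidGo]
      simp [hlt]

-- ===== VERDICT (by name: the statement is the Claim_ definition above) =====
theorem makePyramid_spec : Claim_equal_makePyramid := by
  intro sortedList _
  unfold Spec_makePyramid makePyramid makePyramid_alt
  have h1 : pvT 1 = 1 := by decide
  have := pvKey (sortedList.length : Int) ((↑sortedList.length - pvT 1).toNat) 1 [1] le_rfl
  rw [h1] at this
  rw [this, altGo_cons (sortedList.length : Int) 1, h1]
  simp
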